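-- pv_equiv track=rewrite | github.com/msns83/UT_CE_Projects | Algorihm Design/4/1.py | dfs
-- ===== SOURCE A (Python) =====
-- def dfs(adj):
--     n = len(adj) - 1
--     unvisited = set(range(2, n + 1))
--     stack = [1]
--
--     while stack:
--         node = stack.pop()
--         comp_neighbors = unvisited - adj[node]
--         unvisited -= comp_neighbors
--         stack.extend(comp_neighbors)
--
--     return unvisited
-- ===== SOURCE B (Python) =====
-- def dfs(adj):
--     n = len(adj) - 1
--     unvisited = set(range(2, n + 1))
--     frontier = {1}
--     while frontier:
--         frontier = {v for v in unvisited if any(v not in adj[u] for u in frontier)}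
--         unvisited -= frontier
--     return unvisited
-- ===== Notes on version B (the rewrite author's own statement) =====
-- stated objective: alternative
-- what changed: Replaces the explicit-stack DFS (pop a node, subtract its neighbour set, push the difference) by a frontier-at-a-time BFS: each round a set comprehension collects every still-unvisited vertex complement-adjacent to some frontier vertex and removes the whole layer at once; the equivalence proof shows the final unvisited set is independent of traversal order.
import Mathlib
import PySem

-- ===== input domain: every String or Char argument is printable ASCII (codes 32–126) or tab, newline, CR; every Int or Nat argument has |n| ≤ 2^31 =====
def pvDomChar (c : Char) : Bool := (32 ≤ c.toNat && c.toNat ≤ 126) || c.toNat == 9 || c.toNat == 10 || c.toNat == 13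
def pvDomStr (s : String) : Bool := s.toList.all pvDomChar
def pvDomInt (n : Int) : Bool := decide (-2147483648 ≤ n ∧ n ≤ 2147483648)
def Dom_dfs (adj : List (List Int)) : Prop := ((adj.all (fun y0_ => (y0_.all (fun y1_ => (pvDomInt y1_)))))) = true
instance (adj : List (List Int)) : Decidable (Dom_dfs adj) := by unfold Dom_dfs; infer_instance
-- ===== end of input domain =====

-- A is a stack DFS on the complement graph; B replaces it by a frontier-at-a-time BFS
-- (each round removes the whole next layer at once); the proof shows the final
-- unvisited set does not depend on the traversal order.

-- used by both ports' termination proofs (decreasing_by cites it by name)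
theorem pvDiffFilterLen (U : List Int) (p : Int → Bool) :
    (PySem.Set.diff U (U.filter p)).length + (U.filter p).length = U.length := by
  have h1 : PySem.Set.diff U (U.filter p) = U.filter (fun x => !p x) := by
    show U.filter (fun x => !(U.filter p).contains x) = U.filter (fun x => !p x)
    refine List.filter_congr (fun x hx => ?_)
    by_cases hp : p x = true <;> simp [List.mem_filter, hx, hp]
  rw [h1, Nat.add_comm]
  exact (U.filter_append_perm p).length_eq ▸ (List.length_append ..).symm

-- ===== PORT A =====
-- while stack: node = stack.pop(); comp = unvisited - adj[node];
--              unvisited -= comp; stack.extend(comp)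
-- (adj[node] is always in range under Pre_dfs, so pyGetD's default is never taken;
--  comp, a Python set, is extended onto the stack in the left set's order — the
--  returned set does not depend on that order, which is what the proof establishes)
def dfsLoop (adj : List (List Int)) (unvisited stack : List Int) : List Int :=
  if h : stack = [] then unvisited
  else
    let node := stack.getLast h
    let nb := PySem.List.pyGetD adj node []
    let comp := PySem.Set.diff unvisited nb
    let unvisited' := PySem.Set.diff unvisited comp
    dfsLoop adj unvisited' (stack.dropLast ++ comp)
termination_by unvisited.length + stack.length
decreasing_by
  have hlen := pvDiffFilterLen unvisited (fun x => !(PySem.List.pyGetD adj (stack.getLast h) []).contains x)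
  rw [show List.filter (fun x => !(PySem.List.pyGetD adj (stack.getLast h) []).contains x) unvisited = PySem.Set.diff unvisited (PySem.List.pyGetD adj (stack.getLast h) []) from rfl] at hlen
  have hstack : stack.length ≠ 0 := fun e => h (List.length_eq_zero_iff.mp e)
  simp only [List.length_append, List.length_dropLast]
  omega

def dfs (adj : List (List Int)) : List Int :=
  let n : Int := (adj.length : Int) - 1
  let unvisited : PySem.Set Int := PySem.Set.ofList (PySem.List.pyRange 2 (n + 1) 1)
  dfsLoop adj unvisited [1]

-- ===== PORT B =====
-- while frontier: frontier = {v for v in unvisited if any(v not in adj[u] for u in frontier)};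
--                 unvisited -= frontier
-- (the comprehension iterates sets but only builds a set / tests membership, so the
--  result does not depend on Python's set iteration order)
def dfsAltGo (adj : List (List Int)) (unvisited frontier : List Int) : List Int :=
  if frontier.isEmpty then unvisited
  else
    let frontier' := unvisited.filter
      (fun v => frontier.any (fun u => !(PySem.List.pyGetD adj u []).contains v))
    dfsAltGo adj (PySem.Set.diff unvisited frontier') frontier'
termination_by unvisited.length + frontier.length
decreasing_by
  have hlen := pvDiffFilterLen unvisited
    (fun v => frontier.any (fun u => !(PySem.List.pyGetD adj u []).contains v))
  have hf : frontier.length ≠ 0 := by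
    simpa [List.isEmpty_iff_length_eq_zero] using ‹¬ frontier.isEmpty = true›
  simp only [List.unattach_filter, List.unattach_attach]
  omega

def dfs_alt (adj : List (List Int)) : List Int :=
  let n : Int := (adj.length : Int) - 1
  let unvisited : PySem.Set Int := PySem.Set.ofList (PySem.List.pyRange 2 (n + 1) 1)
  dfsAltGo adj unvisited (PySem.Set.ofList [1])

-- ===== PRECONDITION & SPEC =====
-- Pre_dfs excludes only adj of length < 2, on which Python A raises IndexError at adj[1].
def Pre_dfs (adj : List (List Int)) : Prop := 2 ≤ adj.length
instance (adj : List (List Int)) : Decidable (Pre_dfs adj) := by unfold Pre_dfs; infer_instance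

def pvWitness_dfs : List (List Int) := [[], [2], [], [1]]

def Spec_dfs (adj : List (List Int)) (out : List Int) : Prop := out = dfs_alt adj
instance (adj : List (List Int)) (out : List Int) : Decidable (Spec_dfs adj out) := by unfold Spec_dfs; infer_instance

-- ===== CLAIM (what is proved, stated in full; the proofs are below) =====
def Claim_equal_dfs : Prop := ∀ (adj : List (List Int)), Dom_dfs adj → Pre_dfs adj → Spec_dfs adj (dfs adj)

-- ===== LEMMAS AND PROOFS =====

-- neighbour list of a node (both ports access adj the same way)
def nbr (adj : List (List Int)) (u : Int) : List Int := PySem.List.pyGetD adj u []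

-- x is reachable in the complement graph: x is in the worklist W, or x is a
-- still-unvisited vertex (∈ U) complement-adjacent to a reachable vertex.
inductive Reach (adj : List (List Int)) (U W : List Int) : Int → Prop
  | base {x : Int} (hx : x ∈ W) : Reach adj U W x
  | step {y x : Int} (hy : Reach adj U W y) (hxU : x ∈ U) (hx : x ∉ nbr adj y) : Reach adj U W x

theorem reach_nil {adj : List (List Int)} {U : List Int} {x : Int}
    (h : Reach adj U [] x) : False := by
  induction h with
  | base hx => simp at hx
  | step _ _ _ ih => exact ih

-- one pop of A's stack, seen through Reach: popping `node` and replacing it by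
-- comp (its unvisited complement-neighbours) preserves reachability
theorem reach_pop {adj : List (List Int)} {U W Wn W' comp keep : List Int} {node : Int}
    (hW : ∀ y : Int, y ∈ W ↔ y = node ∨ y ∈ W')
    (hWn : ∀ y : Int, y ∈ Wn ↔ y ∈ comp ∨ y ∈ W')
    (hcomp : ∀ y : Int, y ∈ comp ↔ y ∈ U ∧ y ∉ nbr adj node)
    (hkeep : ∀ y : Int, y ∈ keep ↔ y ∈ U ∧ y ∈ nbr adj node) :
    ∀ x : Int, Reach adj U W x ↔ x = node ∨ x ∈ comp ∨ Reach adj keep Wn x := by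
  intro x
  constructor
  · intro h
    induction h with
    | base hx =>
      rcases (hW _).mp hx with rfl | hx'
      · exact Or.inl rfl
      · exact Or.inr (Or.inr (Reach.base ((hWn _).mpr (Or.inr hx'))))
    | @step y z _ hzU hz ih =>
      by_cases hzc : z ∈ comp
      · exact Or.inr (Or.inl hzc)
      · have hzk : z ∈ keep := by
          rcases Classical.em (z ∈ nbr adj node) with hn | hn
          · exact (hkeep _).mpr ⟨hzU, hn⟩
          · exact absurd ((hcomp _).mpr ⟨hzU, hn⟩) hzc
        rcases ih with rfl | hy | hy
        · exact absurd ((hcomp _).mpr ⟨hzU, hz⟩) hzc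
        · exact Or.inr (Or.inr (Reach.step (Reach.base ((hWn _).mpr (Or.inl hy))) hzk hz))
        · exact Or.inr (Or.inr (Reach.step hy hzk hz))
  · intro h
    rcases h with rfl | hx | hx
    · exact Reach.base ((hW _).mpr (Or.inl rfl))
    · rcases (hcomp _).mp hx with ⟨hxU, hxn⟩
      exact Reach.step (Reach.base ((hW _).mpr (Or.inl rfl))) hxU hxn
    · induction hx with
      | base hx' =>
        rcases (hWn _).mp hx' with hc | hw
        · rcases (hcomp _).mp hc with ⟨hxU, hxn⟩
          exact Reach.step (Reach.base ((hW _).mpr (Or.inl rfl))) hxU hxn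
        · exact Reach.base ((hW _).mpr (Or.inr hw))
      | @step y z _ hzk hz ih =>
        exact Reach.step ih ((hkeep _).mp hzk).1 hz

-- one round of B's loop, seen through Reach: removing the whole frontier F and
-- replacing it by the next layer F' preserves reachability
theorem reach_bfs {adj : List (List Int)} {U F F' U' : List Int}
    (hF' : ∀ y : Int, y ∈ F' ↔ y ∈ U ∧ ∃ u ∈ F, y ∉ nbr adj u)
    (hU' : ∀ y : Int, y ∈ U' ↔ y ∈ U ∧ y ∉ F') :
    ∀ x : Int, Reach adj U F x ↔ x ∈ F ∨ x ∈ F' ∨ Reach adj U' F' x := by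
  intro x
  constructor
  · intro h
    induction h with
    | base hx => exact Or.inl hx
    | @step y z _ hzU hz ih =>
      by_cases hzf : z ∈ F'
      · exact Or.inr (Or.inl hzf)
      · have hzU' : z ∈ U' := (hU' _).mpr ⟨hzU, hzf⟩
        rcases ih with hy | hy | hy
        · exact absurd ((hF' _).mpr ⟨hzU, y, hy, hz⟩) hzf
        · exact Or.inr (Or.inr (Reach.step (Reach.base hy) hzU' hz))
        · exact Or.inr (Or.inr (Reach.step hy hzU' hz))
  · intro h
    rcases h with hx | hx | hx
    · exact Reach.base hx
    · rcases (hF' _).mp hx with ⟨hxU, u, huF, hun⟩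
      exact Reach.step (Reach.base huF) hxU hun
    · induction hx with
      | base hx' =>
        rcases (hF' _).mp hx' with ⟨hxU, u, huF, hun⟩
        exact Reach.step (Reach.base huF) hxU hun
      | @step y z _ hzU' hz ih =>
        exact Reach.step ih ((hU' _).mp hzU').1 hz

-- two sublists of a duplicate-free list with the same members are equal
theorem sublist_ext {α : Type} {l l₁ l₂ : List α}
    (h₁ : List.Sublist l₁ l) (h₂ : List.Sublist l₂ l) (hnd : l.Nodup)
    (hmem : ∀ x, x ∈ l₁ ↔ x ∈ l₂) : l₁ = l₂ := by
  induction l generalizing l₁ l₂ with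
  | nil =>
    rw [List.sublist_nil.mp h₁, List.sublist_nil.mp h₂]
  | cons a t ih =>
    have hat : a ∉ t := (List.nodup_cons.mp hnd).1
    have hndt : t.Nodup := (List.nodup_cons.mp hnd).2
    rcases List.sublist_cons_iff.mp h₁ with h₁' | ⟨r₁, rfl, hr₁⟩
    · rcases List.sublist_cons_iff.mp h₂ with h₂' | ⟨r₂, rfl, hr₂⟩
      · exact ih h₁' h₂' hndt hmem
      · exact absurd (h₁'.mem ((hmem a).mpr (List.mem_cons_self ..))) hat
    · rcases List.sublist_cons_iff.mp h₂ with h₂' | ⟨r₂, rfl, hr₂⟩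
      · exact absurd (h₂'.mem ((hmem a).mp (List.mem_cons_self ..))) hat
      · have : ∀ x, x ∈ r₁ ↔ x ∈ r₂ := by
          intro x
          constructor
          · intro hx
            rcases List.mem_cons.mp ((hmem x).mp (List.mem_cons_of_mem a hx)) with rfl | h
            · exact absurd (hr₁.mem hx) hat
            · exact h
          · intro hx
            rcases List.mem_cons.mp ((hmem x).mpr (List.mem_cons_of_mem a hx)) with rfl | h
            · exact absurd (hr₂.mem hx) hat
            · exact h
        rw [ih hr₁ hr₂ hndt this]

-- characterisation of A's loop: it returns the sublist of `unvisited` of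
-- complement-unreachable vertices
theorem dfsLoop_char (adj : List (List Int)) (U S : List Int) :
    (∀ x ∈ S, x ∉ U) →
    List.Sublist (dfsLoop adj U S) U ∧
      (∀ x : Int, x ∈ dfsLoop adj U S ↔ x ∈ U ∧ ¬ Reach adj U S x) := by
  induction U, S using dfsLoop.induct adj with
  | case1 U =>
    intro hd
    rw [dfsLoop, dif_pos rfl]
    exact ⟨List.Sublist.refl U, fun x =>
      ⟨fun hx => ⟨hx, fun hr => reach_nil hr⟩, fun hx => hx.1⟩⟩
  | case2 U S h node nb comp U' ih =>
    intro hd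
    rw [dfsLoop, dif_neg h]
    have hcomp : ∀ y : Int, y ∈ comp ↔ y ∈ U ∧ y ∉ nbr adj node :=
      fun y => PySem.Set.mem_diff U nb y
    have hU' : ∀ y : Int, y ∈ U' ↔ y ∈ U ∧ y ∈ nbr adj node := by
      intro y
      rw [show U' = PySem.Set.diff U comp from rfl, PySem.Set.mem_diff]
      constructor
      · rintro ⟨hyU, hyc⟩
        refine ⟨hyU, ?_⟩
        by_contra hn
        exact hyc ((hcomp y).mpr ⟨hyU, hn⟩)
      · rintro ⟨hyU, hyn⟩
        exact ⟨hyU, fun hc => ((hcomp y).mp hc).2 hyn⟩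
    have hsubU' : List.Sublist U' U := by
      rw [show U' = U.filter (fun x => !comp.contains x) from rfl]
      exact List.filter_sublist
    have hS : S.dropLast ++ [node] = S := List.dropLast_concat_getLast h
    have hWmem : ∀ y : Int, y ∈ S ↔ y = node ∨ y ∈ S.dropLast := by
      intro y
      conv_lhs => rw [← hS]
      simp [or_comm]
    have hWn : ∀ y : Int, y ∈ S.dropLast ++ comp ↔ y ∈ comp ∨ y ∈ S.dropLast := by
      intro y; simp [or_comm]
    have hd' : ∀ x ∈ S.dropLast ++ comp, x ∉ U' := by
      intro x hx
      rcases (hWn x).mp hx with hc | hdl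
      · intro hU'x
        exact (((hcomp x).mp hc).2) (((hU' x).mp hU'x).2)
      · intro hU'x
        exact hd x ((hWmem x).mpr (Or.inr hdl)) (hsubU'.mem hU'x)
    obtain ⟨ihsub, ihmem⟩ := ih hd'
    have hreach := reach_pop hWmem hWn hcomp hU'
    refine ⟨ihsub.trans hsubU', fun x => ?_⟩
    rw [ihmem x]
    constructor
    · rintro ⟨hxU', hnr⟩
      refine ⟨hsubU'.mem hxU', fun hr => ?_⟩
      rcases (hreach x).mp hr with hx0 | hc | hr'
      · exact hd node ((hWmem node).mpr (Or.inl rfl)) (hsubU'.mem (hx0 ▸ hxU'))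
      · exact (((hcomp x).mp hc).2) (((hU' x).mp hxU').2)
      · exact hnr hr'
    · rintro ⟨hxU, hnr⟩
      have hxc : x ∉ comp := fun hc => hnr ((hreach x).mpr (Or.inr (Or.inl hc)))
      have hxn : x ∈ nbr adj node := by
        by_contra hn
        exact hxc ((hcomp x).mpr ⟨hxU, hn⟩)
      exact ⟨(hU' x).mpr ⟨hxU, hxn⟩, fun hr' => hnr ((hreach x).mpr (Or.inr (Or.inr hr')))⟩

-- characterisation of B's loop: same sublist, same membership
theorem dfsAltGo_char (adj : List (List Int)) (U F : List Int) :
    (∀ x ∈ F, x ∉ U) →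
    List.Sublist (dfsAltGo adj U F) U ∧
      (∀ x : Int, x ∈ dfsAltGo adj U F ↔ x ∈ U ∧ ¬ Reach adj U F x) := by
  induction U, F using dfsAltGo.induct adj with
  | case1 U F h =>
    intro hd
    rw [dfsAltGo, if_pos h]
    have hF : F = [] := List.isEmpty_iff.mp h
    exact ⟨List.Sublist.refl U, fun x =>
      ⟨fun hx => ⟨hx, fun hr => (hF ▸ reach_nil) hr⟩, fun hx => hx.1⟩⟩
  | case2 U F h F' ih =>
    intro hd
    have hFeq : F' = U.filter
        (fun v => F.any (fun u => !(PySem.List.pyGetD adj u []).contains v)) := by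
      simp only [F', List.unattach_filter, List.unattach_attach]
    rw [dfsAltGo, if_neg h, ← hFeq]
    have hF' : ∀ y : Int, y ∈ F' ↔ y ∈ U ∧ ∃ u ∈ F, y ∉ nbr adj u := by
      intro y
      simp only [hFeq, List.mem_filter, List.any_eq_true, nbr]
      constructor
      · rintro ⟨hyU, u, huF, hc⟩
        exact ⟨hyU, u, huF, by simpa using hc⟩
      · rintro ⟨hyU, u, huF, hc⟩
        exact ⟨hyU, u, huF, by simpa using hc⟩
    have hU' : ∀ y : Int, y ∈ PySem.Set.diff U F' ↔ y ∈ U ∧ y ∉ F' :=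
      fun y => PySem.Set.mem_diff U F' y
    have hsubU' : List.Sublist (PySem.Set.diff U F') U := by
      rw [show PySem.Set.diff U F' = U.filter (fun x => !F'.contains x) from rfl]
      exact List.filter_sublist
    have hd' : ∀ x ∈ F', x ∉ PySem.Set.diff U F' := by
      intro x hx hmem
      exact ((hU' x).mp hmem).2 hx
    obtain ⟨ihsub, ihmem⟩ := ih hd'
    have hreach := reach_bfs hF' hU'
    refine ⟨ihsub.trans hsubU', fun x => ?_⟩
    rw [ihmem x]
    constructor
    · rintro ⟨hxU', hnr⟩
      refine ⟨hsubU'.mem hxU', fun hr => ?_⟩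
      rcases (hreach x).mp hr with hf | hf' | hr'
      · exact hd x hf (hsubU'.mem hxU')
      · exact ((hU' x).mp hxU').2 hf'
      · exact hnr hr'
    · rintro ⟨hxU, hnr⟩
      have hxF' : x ∉ F' := fun hf' => hnr ((hreach x).mpr (Or.inr (Or.inl hf')))
      exact ⟨(hU' x).mpr ⟨hxU, hxF'⟩, fun hr' => hnr ((hreach x).mpr (Or.inr (Or.inr hr')))⟩

-- ===== VERDICT (by name: the statement is the Claim_ definition above) =====
theorem dfs_spec : Claim_equal_dfs := by
  unfold Claim_equal_dfs
  intro adj _ _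
  unfold Spec_dfs dfs dfs_alt
  set U₀ : List Int := PySem.Set.ofList
    (PySem.List.pyRange 2 (((adj.length : Int) - 1) + 1) 1) with hU₀
  have hrange : U₀ = PySem.List.pyRange 2 (((adj.length : Int) - 1) + 1) 1 :=
    PySem.Set.ofList_eq_self_of_nodup _ (PySem.List.nodup_pyRange_one ..)
  have hnd : U₀.Nodup := hrange ▸ PySem.List.nodup_pyRange_one ..
  have hone : PySem.Set.ofList [(1 : Int)] = [1] :=
    PySem.Set.ofList_eq_self_of_nodup _ (by simp)
  have hd : ∀ x ∈ [(1 : Int)], x ∉ U₀ := by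
    intro x hx
    simp only [List.mem_singleton] at hx
    subst hx
    rw [hrange, PySem.List.mem_pyRange_one]
    omega
  obtain ⟨hsubA, hmemA⟩ := dfsLoop_char adj U₀ [1] hd
  obtain ⟨hsubB, hmemB⟩ := dfsAltGo_char adj U₀ [1] hd
  rw [hone]
  exact sublist_ext hsubA hsubB hnd (fun x => (hmemA x).trans (hmemB x).symm)
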